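-- pv_equiv track=rewrite | github.com/pauloemmilio/datasentiment | datasentiment.py | verificarPolaridade
-- ===== SOURCE A (Python) =====
-- def verificarPolaridade(tweet):
--     emoticons = [":)", ":(", ":-(", ":-)"]
--     emoticonsPositivos = [":)", ":-)"]
--     emoticonsNegativos = [":(", ":-("]
--     contadorDePositivos = 0
--     contadorDeNegativos = 0
--     for caractere in emoticons:
--         if(caractere in tweet) and (caractere in emoticonsPositivos):
--             contadorDePositivos += 1
--         elif(caractere in tweet) and (caractere in emoticonsNegativos):
--             contadorDeNegativos += 1
--     if(contadorDeNegativos > 0) and (contadorDePositivos == 0):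
--         return "negativo"
--     elif(contadorDePositivos > 0) and (contadorDeNegativos == 0):
--         return "positivo"
--     else:
--         return "neutro"
-- ===== SOURCE B (Python) =====
-- def verificarPolaridade(tweet):
--     hasPos = False
--     hasNeg = False
--     n = len(tweet)
--     for i in range(n):
--         if tweet[i] == ':':
--             j = i + 2 if i + 1 < n and tweet[i + 1] == '-' else i + 1
--             if j < n:
--                 if tweet[j] == ')':
--                     hasPos = True
--                 elif tweet[j] == '(':
--                     hasNeg = True
--     if hasNeg and not hasPos:
--         return "negativo"
--     elif hasPos and not hasNeg:
--         return "positivo"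
--     else:
--         return "neutro"
-- ===== Notes on version B (the rewrite author's own statement) =====
-- stated objective: alternative
-- what changed: Replaces A's loop over an emoticon list with per-emoticon substring searches and counters by a single left-to-right character scan of the tweet that recognises ':' followed by an optional '-' and a paren, setting two booleans; the emoticon lists and the counting disappear.
import Mathlib
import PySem

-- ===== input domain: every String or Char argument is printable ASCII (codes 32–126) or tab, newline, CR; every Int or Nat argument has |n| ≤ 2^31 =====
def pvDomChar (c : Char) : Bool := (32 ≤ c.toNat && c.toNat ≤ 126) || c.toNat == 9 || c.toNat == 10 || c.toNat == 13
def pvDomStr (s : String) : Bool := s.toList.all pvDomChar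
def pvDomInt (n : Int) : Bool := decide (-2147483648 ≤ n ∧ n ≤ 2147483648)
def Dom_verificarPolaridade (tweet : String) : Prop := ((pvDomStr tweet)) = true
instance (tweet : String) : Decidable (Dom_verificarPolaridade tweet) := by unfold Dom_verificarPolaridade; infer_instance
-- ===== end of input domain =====

-- B replaces A's per-emoticon substring searches with counters by a single left-to-right
-- character scan of the tweet setting two booleans; objective: alternative (same cost).

-- ===== PORT A =====
def verificarPolaridade (tweet : String) : String :=
  let emoticons : List String := [":)", ":(", ":-(", ":-)"]
  let emoticonsPositivos : List String := [":)", ":-)"]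
  let emoticonsNegativos : List String := [":(", ":-("]
  let counters :=
    emoticons.foldl (fun (c : Int × Int) caractere =>
      if PySem.Str.isIn caractere tweet && emoticonsPositivos.contains caractere then
        (c.1 + 1, c.2)
      else if PySem.Str.isIn caractere tweet && emoticonsNegativos.contains caractere then
        (c.1, c.2 + 1)
      else c) (0, 0)
  if counters.2 > 0 && counters.1 == 0 then "negativo"
  else if counters.1 > 0 && counters.2 == 0 then "positivo"
  else "neutro"

-- ===== PORT B =====
-- Source B's single pass: at each ':' look at the next character (one character further if it
-- is '-'); ')' sets hasPos, otherwise '(' sets hasNeg; the index always advances by one.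
def scanEmo : List Char → Bool → Bool → Bool × Bool
  | [], p, n => (p, n)
  | c :: rest, p, n =>
    if c = ':' then
      match rest with
      | d :: t =>
        if d = '-' then
          match t with
          | e :: _ => scanEmo rest (p || e == ')') (n || (e != ')' && e == '('))
          | [] => scanEmo rest p n
        else scanEmo rest (p || d == ')') (n || (d != ')' && d == '('))
      | [] => scanEmo rest p n
    else scanEmo rest p n

def verificarPolaridade_alt (tweet : String) : String :=
  let r := scanEmo tweet.toList false false
  if r.2 && !r.1 then "negativo"
  else if r.1 && !r.2 then "positivo"
  else "neutro"

-- ===== PRECONDITION & SPEC =====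
def Spec_verificarPolaridade (tweet : String) (out : String) : Prop := out = verificarPolaridade_alt tweet
instance (tweet : String) (out : String) : Decidable (Spec_verificarPolaridade tweet out) := by unfold Spec_verificarPolaridade; infer_instance

-- ===== CLAIM (what is proved, stated in full; the proofs are below) =====
def Claim_equal_verificarPolaridade : Prop := ∀ (tweet : String), Dom_verificarPolaridade tweet → Spec_verificarPolaridade tweet (verificarPolaridade tweet)

-- ===== LEMMAS AND PROOFS =====

-- The scan computes exactly "some positive / negative emoticon occurs as an infix".
theorem scanEmo_eq (l : List Char) (p n : Bool) :
    scanEmo l p n =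
      (p || decide ([':',')'] <:+: l) || decide ([':','-',')'] <:+: l),
       n || decide ([':','('] <:+: l) || decide ([':','-','('] <:+: l)) := by
  induction l generalizing p n with
  | nil => simp [scanEmo]
  | cons c rest ih =>
    by_cases hc : c = ':'
    · subst hc
      cases rest with
      | nil => simp [scanEmo, List.infix_cons_iff, List.cons_prefix_cons]
      | cons d t =>
        by_cases hd : d = '-'
        · subst hd
          cases t with
          | nil =>
            rw [scanEmo]; simp [ih, List.infix_cons_iff, List.cons_prefix_cons]
          | cons e t' =>
            rw [scanEmo]
            simp only [ih]
            rcases eq_or_ne e ')' with rfl | h1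
            · simp [List.infix_cons_iff, List.cons_prefix_cons,
                Bool.or_assoc, Bool.or_comm, Bool.or_left_comm]
            · rcases eq_or_ne e '(' with rfl | h2
              · simp [List.infix_cons_iff, List.cons_prefix_cons,
                  Bool.or_assoc, Bool.or_comm, Bool.or_left_comm]
              · simp [List.infix_cons_iff, List.cons_prefix_cons, Ne.symm h1, Ne.symm h2,
                  beq_eq_false_iff_ne.mpr h1, beq_eq_false_iff_ne.mpr h2, bne,
                  Bool.or_assoc, Bool.or_left_comm]
        · rw [scanEmo.eq_def]
          simp only [if_neg hd, ih]
          rcases eq_or_ne d ')' with rfl | h1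
          · simp [List.infix_cons_iff, List.cons_prefix_cons,
              Bool.or_assoc]
          · rcases eq_or_ne d '(' with rfl | h2
            · simp [List.infix_cons_iff, List.cons_prefix_cons, Ne.symm hd,
                Bool.or_assoc]
            · simp [List.infix_cons_iff, List.cons_prefix_cons, Ne.symm hd,
                Ne.symm h1, Ne.symm h2,
                beq_eq_false_iff_ne.mpr h1, beq_eq_false_iff_ne.mpr h2, bne,
                Bool.or_assoc, Bool.or_left_comm]
    · rw [scanEmo.eq_def]
      simp only [if_neg hc, ih]
      simp [List.infix_cons_iff, List.cons_prefix_cons, Ne.symm hc]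

-- ===== VERDICT (by name: the statement is the Claim_ definition above) =====
theorem verificarPolaridade_spec : Claim_equal_verificarPolaridade := by
  intro tweet _
  unfold Spec_verificarPolaridade verificarPolaridade verificarPolaridade_alt
  simp only [scanEmo_eq]
  cases h1 : decide ([':',')'] <:+: tweet.toList) <;>
  cases h2 : decide ([':','('] <:+: tweet.toList) <;>
  cases h3 : decide ([':','-','('] <:+: tweet.toList) <;>
  cases h4 : decide ([':','-',')'] <:+: tweet.toList) <;>
    simp_all [List.foldl, PySem.Str.isIn, PySem.Chars.isIn_iff_infix]
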